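-- pv_equiv track=rewrite | github.com/stvadams-research/voynichMS | scripts/phase14_machine/run_14w_window_reordering.py | measure_admissibility
-- ===== SOURCE A (Python) =====
-- from collections import Counter
--
-- def measure_admissibility(lines, lattice_map, window_contents, num_wins):
--     """Measure drift-±1 admissibility and categorize transitions."""
--     categories = Counter()
--     current_window = 0
--
--     for line in lines:
--         for word in line:
--             if word not in lattice_map:
--                 continue
--
--             found_dist = None
--             for dist in range(0, num_wins // 2 + 1):
--                 for direction in [1, -1]:
--                     check_win = (current_window + (dist * direction)) % num_wins
--                     if word in window_contents.get(check_win, []):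
--                         found_dist = dist
--                         break
--                 if found_dist is not None:
--                     break
--
--             if found_dist is None:
--                 categories["extreme_jump"] += 1
--                 current_window = lattice_map[word]
--             elif found_dist <= 1:
--                 categories["admissible"] += 1
--                 current_window = lattice_map.get(
--                     word, (current_window + 1) % num_wins
--                 )
--             elif found_dist <= 3:
--                 categories["extended_drift"] += 1
--                 current_window = lattice_map.get(
--                     word, (current_window + 1) % num_wins
--                 )
--             elif found_dist <= 10:
--                 categories["mechanical_slip"] += 1
--                 current_window = lattice_map.get(
--                     word, (current_window + 1) % num_wins
--                 )
--             else:
--                 categories["extreme_jump"] += 1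
--                 current_window = lattice_map[word]
--
--     total = sum(categories.values())
--     return categories, total
-- ===== SOURCE B (Python) =====
-- from collections import Counter
--
-- def measure_admissibility(lines, lattice_map, window_contents, num_wins):
--     """Measure drift-±1 admissibility and categorize transitions."""
--     # One-off inverted index: word -> set of windows (in range) containing it.
--     win_index = {}
--     if num_wins > 0:
--         for win, words in window_contents.items():
--             if 0 <= win < num_wins:
--                 for w in set(words):
--                     win_index.setdefault(w, set()).add(win)
--
--     categories = Counter()
--     current_window = 0
--     for line in lines:
--         for word in line:
--             if word not in lattice_map:
--                 continue
--             wins = win_index.get(word, ())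
--             if wins:
--                 d = min(min((k - current_window) % num_wins,
--                             (current_window - k) % num_wins) for k in wins)
--             else:
--                 d = None
--             if d is None:
--                 categories["extreme_jump"] += 1
--             elif d <= 1:
--                 categories["admissible"] += 1
--             elif d <= 3:
--                 categories["extended_drift"] += 1
--             elif d <= 10:
--                 categories["mechanical_slip"] += 1
--             else:
--                 categories["extreme_jump"] += 1
--             current_window = lattice_map[word]
--     total = sum(categories.values())
--     return categories, total
-- ===== Notes on version B (the rewrite author's own statement) =====
-- stated objective: faster
-- what changed: Instead of scanning windows outward by distance 0..num_wins//2 with a list membership test per word, B builds an inverted index word -> set of windows once and takes each word's minimal circular distance to its windows directly.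
import Mathlib
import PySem

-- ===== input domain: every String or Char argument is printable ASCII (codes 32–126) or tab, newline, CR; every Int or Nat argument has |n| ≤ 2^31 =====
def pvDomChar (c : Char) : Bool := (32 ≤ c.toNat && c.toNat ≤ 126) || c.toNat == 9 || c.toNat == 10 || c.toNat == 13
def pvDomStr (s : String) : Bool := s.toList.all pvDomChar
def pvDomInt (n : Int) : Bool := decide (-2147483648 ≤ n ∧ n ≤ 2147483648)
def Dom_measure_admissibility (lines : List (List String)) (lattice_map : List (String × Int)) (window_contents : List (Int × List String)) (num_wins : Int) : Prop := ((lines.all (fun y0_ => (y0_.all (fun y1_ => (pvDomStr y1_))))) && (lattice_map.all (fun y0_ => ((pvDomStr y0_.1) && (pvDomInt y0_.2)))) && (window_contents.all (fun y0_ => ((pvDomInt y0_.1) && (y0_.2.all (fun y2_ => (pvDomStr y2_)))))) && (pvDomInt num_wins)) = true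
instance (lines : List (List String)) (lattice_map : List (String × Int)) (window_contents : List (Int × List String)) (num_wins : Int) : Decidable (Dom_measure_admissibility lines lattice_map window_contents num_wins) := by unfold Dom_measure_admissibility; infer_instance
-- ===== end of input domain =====

-- B replaces A's per-word scan over all windows (distance 0..num_wins//2, list membership in each)
-- by an inverted index word → set of windows built once, taking the minimal circular distance directly.
-- (Return-value equivalence; neither program mutates its arguments.)

-- ===== PORT A =====

-- inner search: 'for dist in range(0, num_wins//2+1): for direction in [1,-1]: … break'
def pvASearch (wc : PySem.Dict Int (List String)) (n cw : Int) (word : String) : List Int → Option Int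
  | [] => none
  | d :: rest =>
    if (wc.getD (PySem.Int.mod (cw + d * 1) n) []).contains word then some d
    else if (wc.getD (PySem.Int.mod (cw + d * (-1)) n) []).contains word then some d
    else pvASearch wc n cw word rest

-- body of A's word loop; state = (categories, current_window)
def pvAStep (lm : PySem.Dict String Int) (wc : PySem.Dict Int (List String)) (n : Int)
    (st : PySem.Dict String Int × Int) (word : String) : PySem.Dict String Int × Int :=
  if lm.contains word then
    match pvASearch wc n st.2 word (PySem.List.pyRange 0 (PySem.Int.floordiv n 2 + 1) 1) with
    | none => (st.1.modify "extreme_jump" 0 (· + 1), lm.getD word 0)  -- lattice_map[word]: no KeyError, word is a key here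
    | some d =>
      if d ≤ 1 then (st.1.modify "admissible" 0 (· + 1), lm.getD word (PySem.Int.mod (st.2 + 1) n))
      else if d ≤ 3 then (st.1.modify "extended_drift" 0 (· + 1), lm.getD word (PySem.Int.mod (st.2 + 1) n))
      else if d ≤ 10 then (st.1.modify "mechanical_slip" 0 (· + 1), lm.getD word (PySem.Int.mod (st.2 + 1) n))
      else (st.1.modify "extreme_jump" 0 (· + 1), lm.getD word 0)  -- lattice_map[word]
  else st

def measure_admissibility (lines : List (List String)) (lattice_map : List (String × Int)) (window_contents : List (Int × List String)) (num_wins : Int) : (List (String × Int)) × Int :=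
  let lm := PySem.Dict.mk lattice_map
  let wc := PySem.Dict.mk window_contents
  let st := lines.foldl (fun st line => line.foldl (pvAStep lm wc num_wins) st) (PySem.Dict.empty, 0)
  (st.1.items, st.1.values.sum)

-- ===== PORT B =====

-- '.items()' of the dict given as an association list: first occurrence of each key (lookup = first match)
def pvUniqItems : List (Int × List String) → List Int → List (Int × List String)
  | [], _ => []
  | (k, ws) :: rest, seen =>
    if k ∈ seen then pvUniqItems rest seen else (k, ws) :: pvUniqItems rest (k :: seen)

-- win_index: word → set of in-range windows containing it ('setdefault(w, set()).add(win)')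
def pvBIndex (window_contents : List (Int × List String)) (n : Int) : PySem.Dict String (PySem.Set Int) :=
  if 0 < n then
    (pvUniqItems window_contents []).foldl (fun idx p =>
      if 0 ≤ p.1 ∧ p.1 < n then
        (PySem.Set.ofList p.2).foldl (fun idx w => idx.modify w [] (fun s => PySem.Set.add s p.1)) idx
      else idx) PySem.Dict.empty
  else PySem.Dict.empty

-- min((k - cw) % n, (cw - k) % n)
def pvDist (n cw k : Int) : Int := min (PySem.Int.mod (k - cw) n) (PySem.Int.mod (cw - k) n)

-- body of B's word loop; 'min(...)' over the nonempty set wins is PySem.List.min?, none ↔ wins empty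
def pvBStep (lm : PySem.Dict String Int) (idx : PySem.Dict String (PySem.Set Int)) (n : Int)
    (st : PySem.Dict String Int × Int) (word : String) : PySem.Dict String Int × Int :=
  if lm.contains word then
    let wins := idx.getD word []
    let cats :=
      match PySem.List.min? (wins.map (fun k => pvDist n st.2 k)) (fun x => x) with
      | none => st.1.modify "extreme_jump" 0 (· + 1)
      | some d =>
        if d ≤ 1 then st.1.modify "admissible" 0 (· + 1)
        else if d ≤ 3 then st.1.modify "extended_drift" 0 (· + 1)
        else if d ≤ 10 then st.1.modify "mechanical_slip" 0 (· + 1)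
        else st.1.modify "extreme_jump" 0 (· + 1)
    (cats, lm.getD word 0)  -- lattice_map[word]: no KeyError, word is a key here
  else st

def measure_admissibility_alt (lines : List (List String)) (lattice_map : List (String × Int)) (window_contents : List (Int × List String)) (num_wins : Int) : (List (String × Int)) × Int :=
  let lm := PySem.Dict.mk lattice_map
  let idx := pvBIndex window_contents num_wins
  let st := lines.foldl (fun st line => line.foldl (pvBStep lm idx num_wins) st) (PySem.Dict.empty, 0)
  (st.1.items, st.1.values.sum)

-- ===== PRECONDITION & SPEC =====
-- Pre_ excludes exactly the inputs where A raises ZeroDivisionError: num_wins = 0 while some word of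
-- lines is a key of lattice_map (the '% num_wins' in the search is then reached).
def Pre_measure_admissibility (lines : List (List String)) (lattice_map : List (String × Int)) (window_contents : List (Int × List String)) (num_wins : Int) : Prop :=
  num_wins ≠ 0 ∨ ∀ line ∈ lines, ∀ w ∈ line, w ∉ lattice_map.map Prod.fst
instance (lines : List (List String)) (lattice_map : List (String × Int)) (window_contents : List (Int × List String)) (num_wins : Int) : Decidable (Pre_measure_admissibility lines lattice_map window_contents num_wins) := by unfold Pre_measure_admissibility; infer_instance

def pvWitness_measure_admissibility : List (List String) × (List (String × Int)) × (List (Int × List String)) × Int :=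
  ([["a", "b"], ["c"]], [("a", 0), ("c", 1)], [(0, ["a"]), (1, ["c"])], 2)

def Spec_measure_admissibility (lines : List (List String)) (lattice_map : List (String × Int)) (window_contents : List (Int × List String)) (num_wins : Int) (out : (List (String × Int)) × Int) : Prop := out = measure_admissibility_alt lines lattice_map window_contents num_wins
instance (lines : List (List String)) (lattice_map : List (String × Int)) (window_contents : List (Int × List String)) (num_wins : Int) (out : (List (String × Int)) × Int) : Decidable (Spec_measure_admissibility lines lattice_map window_contents num_wins out) := by unfold Spec_measure_admissibility; infer_instance

-- ===== CLAIM (what is proved, stated in full; the proofs are below) =====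
def Claim_equal_measure_admissibility : Prop := ∀ (lines : List (List String)) (lattice_map : List (String × Int)) (window_contents : List (Int × List String)) (num_wins : Int), Dom_measure_admissibility lines lattice_map window_contents num_wins → Pre_measure_admissibility lines lattice_map window_contents num_wins → Spec_measure_admissibility lines lattice_map window_contents num_wins (measure_admissibility lines lattice_map window_contents num_wins)
-- ===== LEMMAS AND PROOFS =====

theorem pv_getD_congr {ν : Type} (d : PySem.Dict String ν) (k : String) (x y : ν)
    (h : d.contains k = true) : d.getD k x = d.getD k y := by
  rw [PySem.Dict.getD_eq_get?_getD, PySem.Dict.getD_eq_get?_getD]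
  rw [PySem.Dict.contains_eq_isSome_get?] at h
  cases hg : d.get? k with
  | none => rw [hg] at h; simp at h
  | some v => simp

-- A's inner two-direction search is a first-hit search over this predicate.
def pvHit (wc : PySem.Dict Int (List String)) (n cw : Int) (word : String) (d : Int) : Bool :=
  (wc.getD (PySem.Int.mod (cw + d * 1) n) []).contains word ||
  (wc.getD (PySem.Int.mod (cw + d * (-1)) n) []).contains word

theorem pvASearch_eq_find? (wc : PySem.Dict Int (List String)) (n cw : Int) (word : String)
    (l : List Int) : pvASearch wc n cw word l = l.find? (pvHit wc n cw word) := by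
  induction l with
  | nil => rfl
  | cons d rest ih =>
    simp only [pvASearch, List.find?, pvHit, ih]
    cases h1 : (wc.getD (PySem.Int.mod (cw + d * 1) n) []).contains word <;>
      cases h2 : (wc.getD (PySem.Int.mod (cw + d * (-1)) n) []).contains word <;> simp

theorem pv_inner_mem (k : Int) (ws : List String) (d : PySem.Dict String (PySem.Set Int))
    (word : String) (k' : Int) :
    k' ∈ (ws.foldl (fun d w => d.modify w [] (fun s => PySem.Set.add s k)) d).getD word [] ↔
      k' ∈ d.getD word [] ∨ (word ∈ ws ∧ k' = k) := by
  induction ws generalizing d with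
  | nil => simp
  | cons w rest ih =>
    simp only [List.foldl_cons, ih, PySem.Dict.getD_modify, List.mem_cons]
    by_cases hw : word = w
    · simp [hw, PySem.Set.mem_add]
      tauto
    · simp [hw]

theorem pv_outer_mem (n : Int) (pairs : List (Int × List String))
    (d : PySem.Dict String (PySem.Set Int)) (word : String) (k' : Int) :
    k' ∈ (pairs.foldl (fun idx p =>
        if 0 ≤ p.1 ∧ p.1 < n then
          (PySem.Set.ofList p.2).foldl (fun idx w => idx.modify w [] (fun s => PySem.Set.add s p.1)) idx
        else idx) d).getD word [] ↔
      k' ∈ d.getD word [] ∨ ∃ p ∈ pairs, p.1 = k' ∧ (0 ≤ k' ∧ k' < n) ∧ word ∈ p.2 := by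
  induction pairs generalizing d with
  | nil => simp
  | cons p rest ih =>
    simp only [List.foldl_cons, ih, List.mem_cons]
    by_cases hp : 0 ≤ p.1 ∧ p.1 < n
    · simp only [if_pos hp, pv_inner_mem, PySem.Set.mem_ofList]
      constructor
      · rintro ((h | ⟨hw, rfl⟩) | ⟨q, hq, h1, h2, h3⟩)
        · exact Or.inl h
        · exact Or.inr ⟨p, Or.inl rfl, rfl, hp, hw⟩
        · exact Or.inr ⟨q, Or.inr hq, h1, h2, h3⟩
      · rintro (h | ⟨q, (rfl | hq), h1, h2, h3⟩)
        · exact Or.inl (Or.inl h)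
        · subst h1; exact Or.inl (Or.inr ⟨h3, rfl⟩)
        · exact Or.inr ⟨q, hq, h1, h2, h3⟩
    · rw [if_neg hp]
      constructor
      · rintro (h | ⟨q, hq, hrest⟩)
        · exact Or.inl h
        · exact Or.inr ⟨q, Or.inr hq, hrest⟩
      · rintro (h | ⟨q, (rfl | hq), h1, h2, h3⟩)
        · exact Or.inl h
        · exact absurd (h1 ▸ h2) hp
        · exact Or.inr ⟨q, hq, h1, h2, h3⟩

theorem pv_uniq_mem (l : List (Int × List String)) (seen : List Int) (p : Int × List String) :
    p ∈ pvUniqItems l seen ↔ p.1 ∉ seen ∧ l.find? (fun q => q.1 == p.1) = some p := by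
  induction l generalizing seen with
  | nil => simp [pvUniqItems]
  | cons q rest ih =>
    obtain ⟨k0, ws⟩ := q
    simp only [pvUniqItems]
    by_cases hk : k0 ∈ seen
    · rw [if_pos hk, ih]
      constructor
      · rintro ⟨hns, hf⟩
        refine ⟨hns, ?_⟩
        rw [List.find?_cons_of_neg]
        · exact hf
        · simp; rintro rfl; exact hns hk
      · rintro ⟨hns, hf⟩
        refine ⟨hns, ?_⟩
        rw [List.find?_cons_of_neg] at hf
        · exact hf
        · simp; rintro rfl; exact hns hk
    · rw [if_neg hk]
      simp only [List.mem_cons, ih]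
      constructor
      · rintro (rfl | ⟨hns, hf⟩)
        · exact ⟨hk, by simp⟩
        · simp at hns
          refine ⟨hns.2, ?_⟩
          rw [List.find?_cons_of_neg]
          · exact hf
          · simp; exact fun h => absurd h.symm hns.1
      · rintro ⟨hns, hf⟩
        by_cases hpk : p.1 = k0
        · left
          rw [List.find?_cons_of_pos (by simp [hpk])] at hf
          exact (Option.some_inj.mp hf).symm
        · right
          rw [List.find?_cons_of_neg (by simp; exact fun h => absurd h.symm hpk)] at hf
          exact ⟨by simp [hpk, hns], hf⟩

theorem pv_idx_mem (l : List (Int × List String)) (n : Int) (word : String) (k : Int) :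
    k ∈ (pvBIndex l n).getD word [] ↔
      0 < n ∧ 0 ≤ k ∧ k < n ∧ ((PySem.Dict.mk l).getD k []).contains word = true := by
  unfold pvBIndex
  by_cases hn : 0 < n
  · rw [if_pos hn, pv_outer_mem]
    simp only [PySem.Dict.getD_empty, List.not_mem_nil, false_or]
    constructor
    · rintro ⟨p, hp, rfl, hb, hw⟩
      rw [pv_uniq_mem] at hp
      refine ⟨hn, hb.1, hb.2, ?_⟩
      have : (PySem.Dict.mk l).getD p.1 [] = p.2 := by
        simp only [PySem.Dict.getD_eq_get?_getD, PySem.Dict.get?]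
        rw [hp.2]
        rfl
      rw [this]
      simpa [List.contains_iff_mem] using hw
    · rintro ⟨-, h0, hkn, hc⟩
      cases hf : l.find? (fun q => q.1 == k) with
      | none =>
        exfalso
        simp only [PySem.Dict.getD_eq_get?_getD, PySem.Dict.get?, hf] at hc
        simp at hc
      | some q =>
        have hq1 : q.1 = k := by
          have := List.find?_some hf
          simpa using this
        have hgd : (PySem.Dict.mk l).getD k [] = q.2 := by
          simp only [PySem.Dict.getD_eq_get?_getD, PySem.Dict.get?, hf]
          rfl
        refine ⟨q, ?_, hq1, ⟨h0, hkn⟩, ?_⟩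
        · rw [pv_uniq_mem]
          exact ⟨by simp, by rw [hq1]; exact hf⟩
        · rw [hgd] at hc
          simpa [List.contains_iff_mem] using hc
  · rw [if_neg hn]
    simp [hn, PySem.Dict.getD_empty]

theorem pv_mod_pair (n x : Int) (hn : 0 < n) :
    x % n + (-x) % n = 0 ∨ x % n + (-x) % n = n := by
  by_cases h : x % n = 0
  · left
    have : (-x) % n = 0 := by
      rw [Int.neg_emod_eq_sub_emod, Int.sub_emod, h]
      simp
    omega
  · right
    have h1 : 0 ≤ x % n := Int.emod_nonneg x (by omega)
    have h2 : x % n < n := Int.emod_lt_of_pos x hn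
    have : (-x) % n = n - x % n := by
      have e1 : (-x) % n = (0 - x % n) % n := by
        rw [Int.neg_emod_eq_sub_emod, Int.sub_emod, Int.emod_self]
      have e2 : (0 - x % n) % n = (0 - x % n + n * 1) % n := by
        rw [Int.add_mul_emod_self_left]
      rw [e1, e2, show 0 - x % n + n * 1 = n - x % n by ring]
      exact Int.emod_eq_of_lt (by omega) (by omega)
    omega

theorem pv_dist_bounds (n cw k : Int) (hn : 0 < n) :
    0 ≤ pvDist n cw k ∧ pvDist n cw k ≤ n / 2 := by
  unfold pvDist
  rw [PySem.Int.mod_eq_emod_of_pos hn, PySem.Int.mod_eq_emod_of_pos hn]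
  have hp := pv_mod_pair n (k - cw) hn
  rw [show -(k - cw) = cw - k by ring] at hp
  have h1 : 0 ≤ (k - cw) % n := Int.emod_nonneg _ (by omega)
  have h2 : 0 ≤ (cw - k) % n := Int.emod_nonneg _ (by omega)
  rcases min_choice ((k - cw) % n) ((cw - k) % n) with h | h <;> rw [h] <;>
    [have := min_le_right ((k - cw) % n) ((cw - k) % n);
     have := min_le_left ((k - cw) % n) ((cw - k) % n)] <;> rw [h] at this <;> omega

theorem pv_hit_of_mem (l : List (Int × List String)) (n cw : Int) (word : String) (k : Int)
    (hn : 0 < n) (hk : k ∈ (pvBIndex l n).getD word []) :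
    pvHit (PySem.Dict.mk l) n cw word (pvDist n cw k) = true := by
  obtain ⟨-, h0, hkn, hc⟩ := (pv_idx_mem l n word k).mp hk
  unfold pvHit pvDist
  rw [PySem.Int.mod_eq_emod_of_pos hn, PySem.Int.mod_eq_emod_of_pos hn,
      PySem.Int.mod_eq_emod_of_pos hn, PySem.Int.mod_eq_emod_of_pos hn]
  rcases min_choice ((k - cw) % n) ((cw - k) % n) with h | h <;> rw [h]
  · have : (cw + (k - cw) % n * 1) % n = k := by
      rw [mul_one, Int.add_emod_emod, show cw + (k - cw) = k by ring]
      exact Int.emod_eq_of_lt h0 hkn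
    rw [this, hc]
    simp
  · have : (cw + (cw - k) % n * (-1)) % n = k := by
      rw [show cw + (cw - k) % n * (-1) = cw - (cw - k) % n by ring, Int.sub_emod_emod,
          show cw - (cw - k) = k by ring]
      exact Int.emod_eq_of_lt h0 hkn
    rw [this, hc]
    simp

theorem pv_mem_of_hit (l : List (Int × List String)) (n cw : Int) (word : String) (d : Int)
    (hn : 0 < n) (hd0 : 0 ≤ d) (hdn : d < n)
    (hhit : pvHit (PySem.Dict.mk l) n cw word d = true) :
    ∃ k ∈ (pvBIndex l n).getD word [], pvDist n cw k ≤ d := by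
  unfold pvHit at hhit
  rw [PySem.Int.mod_eq_emod_of_pos hn, PySem.Int.mod_eq_emod_of_pos hn, Bool.or_eq_true] at hhit
  rcases hhit with hc | hc
  · refine ⟨(cw + d * 1) % n, ?_, ?_⟩
    · rw [pv_idx_mem]
      exact ⟨hn, Int.emod_nonneg _ (by omega), Int.emod_lt_of_pos _ hn, hc⟩
    · unfold pvDist
      rw [PySem.Int.mod_eq_emod_of_pos hn, PySem.Int.mod_eq_emod_of_pos hn]
      have : ((cw + d * 1) % n - cw) % n = d := by
        rw [Int.emod_sub_emod, show cw + d * 1 - cw = d by ring]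
        exact Int.emod_eq_of_lt hd0 hdn
      exact le_trans (min_le_left _ _) (le_of_eq this)
  · refine ⟨(cw + d * (-1)) % n, ?_, ?_⟩
    · rw [pv_idx_mem]
      exact ⟨hn, Int.emod_nonneg _ (by omega), Int.emod_lt_of_pos _ hn, hc⟩
    · unfold pvDist
      rw [PySem.Int.mod_eq_emod_of_pos hn, PySem.Int.mod_eq_emod_of_pos hn]
      have : (cw - (cw + d * (-1)) % n) % n = d := by
        rw [Int.sub_emod_emod, show cw - (cw + d * (-1)) = d by ring]
        exact Int.emod_eq_of_lt hd0 hdn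
      exact le_trans (min_le_right _ _) (le_of_eq this)

theorem pv_search_eq_min (l : List (Int × List String)) (n cw : Int) (word : String)
    (hn : 0 < n) :
    (PySem.List.pyRange 0 (PySem.Int.floordiv n 2 + 1) 1).find? (pvHit (PySem.Dict.mk l) n cw word)
      = PySem.List.min? (((pvBIndex l n).getD word []).map (fun k => pvDist n cw k)) (fun x => x) := by
  rw [PySem.Int.floordiv_eq_ediv_of_pos (by norm_num)]
  by_cases hcc : (pvBIndex l n).getD word [] = []
  · rw [hcc]
    rw [show PySem.List.min? (List.map (fun k => pvDist n cw k) []) (fun x => x) = none from rfl]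
    apply List.find?_eq_none.mpr
    intro d hd
    rw [PySem.List.mem_pyRange_one] at hd
    simp only [Bool.not_eq_true]
    by_contra hhit
    rw [Bool.not_eq_false] at hhit
    obtain ⟨k, hk, -⟩ := pv_mem_of_hit l n cw word d hn hd.1 (by omega) hhit
    rw [hcc] at hk
    exact absurd hk (List.not_mem_nil)
  · have hne : ((pvBIndex l n).getD word []).map (fun k => pvDist n cw k) ≠ [] := by
      simpa using hcc
    cases hm : PySem.List.min? (((pvBIndex l n).getD word []).map (fun k => pvDist n cw k)) (fun x => x) with
    | none => exact absurd ((PySem.List.min?_eq_none_iff _ _).mp hm) hne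
    | some v =>
      have hvmem := PySem.List.min?_mem hm
      have hvmin := PySem.List.min?_isMin hm
      obtain ⟨k, hk, hkv⟩ := List.mem_map.mp hvmem
      have hb := pv_dist_bounds n cw k hn
      have hhitv : pvHit (PySem.Dict.mk l) n cw word v = true := by
        rw [← hkv]; exact pv_hit_of_mem l n cw word k hn hk
      have hvrange : v ∈ PySem.List.pyRange 0 (n / 2 + 1) 1 := by
        rw [PySem.List.mem_pyRange_one]
        omega
      have hsome : (PySem.List.pyRange 0 (n / 2 + 1) 1).find?
          (pvHit (PySem.Dict.mk l) n cw word) |>.isSome := by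
        rw [List.find?_isSome]
        exact ⟨v, hvrange, hhitv⟩
      obtain ⟨d, hd⟩ := Option.isSome_iff_exists.mp hsome
      have hdhit : pvHit (PySem.Dict.mk l) n cw word d = true := List.find?_some hd
      have hdrange := List.mem_of_find?_eq_some hd
      rw [PySem.List.mem_pyRange_one] at hdrange
      obtain ⟨k', hk', hdist⟩ := pv_mem_of_hit l n cw word d hn hdrange.1 (by omega) hdhit
      have hvd : v ≤ d := le_trans (hvmin _ (List.mem_map.mpr ⟨k', hk', rfl⟩)) hdist
      obtain ⟨-, as, bs, heq, hnot⟩ := List.find?_eq_some_iff_append.mp hd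
      have hdv : d ≤ v := by
        by_contra hlt
        rw [not_le] at hlt
        have hvmem2 : v ∈ as ++ d :: bs := by rw [← heq]; exact hvrange
        have hpw := PySem.List.pairwise_lt_pyRange_one (a := 0) (b := n / 2 + 1)
        rw [heq, List.pairwise_append] at hpw
        rcases List.mem_append.mp hvmem2 with hv1 | hv2
        · exact absurd hhitv (by simpa using hnot v hv1)
        · rcases List.mem_cons.mp hv2 with rfl | hv3
          · omega
          · have := (List.pairwise_cons.mp hpw.2.1).1 v hv3
            omega
      rw [hd, le_antisymm hdv hvd]

theorem pv_step_eq (lattice_map : List (String × Int)) (l : List (Int × List String)) (n : Int)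
    (hn : n ≠ 0) (st : PySem.Dict String Int × Int) (word : String) :
    pvAStep (PySem.Dict.mk lattice_map) (PySem.Dict.mk l) n st word =
      pvBStep (PySem.Dict.mk lattice_map) (pvBIndex l n) n st word := by
  unfold pvAStep pvBStep
  cases hcon : (PySem.Dict.mk lattice_map).contains word with
  | false => simp
  | true =>
    simp only [if_pos]
    rw [pvASearch_eq_find?]
    have hsearch : (PySem.List.pyRange 0 (PySem.Int.floordiv n 2 + 1) 1).find?
          (pvHit (PySem.Dict.mk l) n st.2 word)
        = PySem.List.min? (((pvBIndex l n).getD word []).map (fun k => pvDist n st.2 k)) (fun x => x) := by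
      rcases lt_or_gt_of_ne hn with hneg | hpos
      · have h1 : PySem.List.pyRange 0 (PySem.Int.floordiv n 2 + 1) 1 = [] := by
          apply PySem.List.pyRange_one_eq_nil
          rw [PySem.Int.floordiv_eq_ediv_of_pos (by norm_num)]
          omega
        have h2 : pvBIndex l n = PySem.Dict.empty := by
          unfold pvBIndex
          rw [if_neg (by omega)]
        rw [h1, h2, PySem.Dict.getD_empty]
        rfl
      · exact pv_search_eq_min l n st.2 word hpos
    rw [hsearch]
    cases PySem.List.min? (((pvBIndex l n).getD word []).map (fun k => pvDist n st.2 k)) (fun x => x) with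
    | none => rfl
    | some d =>
      dsimp only
      split_ifs <;> simp only [Prod.mk.injEq, true_and] <;>
        exact pv_getD_congr _ word _ _ hcon

theorem pv_contains_false (lattice_map : List (String × Int)) (w : String)
    (hw : w ∉ lattice_map.map Prod.fst) : (PySem.Dict.mk lattice_map).contains w = false := by
  rw [PySem.Dict.contains_eq_decide_mem_keys]
  simp [PySem.Dict.keys, hw]

theorem pv_fold_skip {σ : Type} (step : σ → String → σ) (lines : List (List String)) (init : σ)
    (h : ∀ line ∈ lines, ∀ w ∈ line, ∀ st, step st w = st) :
    lines.foldl (fun st line => line.foldl step st) init = init := by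
  induction lines generalizing init with
  | nil => rfl
  | cons line rest ih =>
    simp only [List.foldl_cons]
    have hline : ∀ (ws : List String), (∀ w ∈ ws, ∀ st', step st' w = st') →
        ∀ st, ws.foldl step st = st := by
      intro ws hws
      induction ws with
      | nil => intro st; rfl
      | cons w ws' ihw =>
        intro st
        simp only [List.foldl_cons, hws w (by simp)]
        exact ihw (fun w' hw' => hws w' (by simp [hw'])) st
    rw [hline line (h line (by simp)) init]
    exact ih init (fun l hl => h l (by simp [hl]))


-- ===== VERDICT (by name: the statement is the Claim_ definition above) =====
theorem measure_admissibility_spec : Claim_equal_measure_admissibility := by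
  intro lines lattice_map window_contents num_wins _hdom hpre
  unfold Spec_measure_admissibility
  simp only [measure_admissibility, measure_admissibility_alt]
  rcases hpre with hn | hnol
  · have hstep : pvAStep (PySem.Dict.mk lattice_map) (PySem.Dict.mk window_contents) num_wins
        = pvBStep (PySem.Dict.mk lattice_map) (pvBIndex window_contents num_wins) num_wins :=
      funext fun st => funext fun w => pv_step_eq lattice_map window_contents num_wins hn st w
    rw [hstep]
  · have hA := pv_fold_skip (pvAStep (PySem.Dict.mk lattice_map) (PySem.Dict.mk window_contents) num_wins)
      lines (PySem.Dict.empty, 0) (fun line hl w hw st => by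
        unfold pvAStep
        rw [pv_contains_false lattice_map w (hnol line hl w hw)]
        simp)
    have hB := pv_fold_skip (pvBStep (PySem.Dict.mk lattice_map) (pvBIndex window_contents num_wins) num_wins)
      lines (PySem.Dict.empty, 0) (fun line hl w hw st => by
        unfold pvBStep
        rw [pv_contains_false lattice_map w (hnol line hl w hw)]
        simp)
    rw [hA, hB]
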